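-- pv_equiv track=rewrite | github.com/Arsen1302/Code-copy-detector | TestData/solutions/problem_425_4.py | solution_425_4
-- ===== SOURCE A (Python) =====
-- from typing import List
--
-- def solution_425_4(bits: List[int]) -> bool:
--     idx =0
--     flag = True
--     while(idx<len(bits)):
--         if(bits[idx]==0):
--             idx+=1
--             flag =True
--         else:
--             idx+=2
--             flag = False
--     return flag
-- ===== SOURCE B (Python) =====
-- from typing import List
--
-- def solution_425_4(bits: List[int]) -> bool:
--     # Right-to-left: last element must be 0; answer is parity of the
--     # trailing run of nonzero values just before it.
--     if not bits:
--         return True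
--     rev = bits[::-1]
--     if rev[0] != 0:
--         return False
--     count = 0
--     for x in rev[1:]:
--         if x == 0:
--             break
--         count += 1
--     return count % 2 == 0
-- ===== Notes on version B (the rewrite author's own statement) =====
-- stated objective: alternative
-- what changed: Replaced the forward greedy parse (skip 1 on zero, 2 on nonzero, tracking a flag) by a single right-to-left scan: last element must be 0 and the trailing run of nonzero values must have even length.
import Mathlib
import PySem

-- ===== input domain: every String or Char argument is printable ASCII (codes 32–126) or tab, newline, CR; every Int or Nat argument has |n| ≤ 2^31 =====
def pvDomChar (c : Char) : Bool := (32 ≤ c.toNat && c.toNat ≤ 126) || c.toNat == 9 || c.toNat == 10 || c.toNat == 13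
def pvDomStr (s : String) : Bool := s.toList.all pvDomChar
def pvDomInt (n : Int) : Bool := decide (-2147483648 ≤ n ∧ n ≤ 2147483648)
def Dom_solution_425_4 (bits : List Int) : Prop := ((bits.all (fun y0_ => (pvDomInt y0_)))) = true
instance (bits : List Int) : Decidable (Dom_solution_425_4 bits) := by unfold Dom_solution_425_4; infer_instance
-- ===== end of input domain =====

-- B replaces A's forward greedy parse by a right-to-left scan of the trailing
-- nonzero run (alternative decomposition; same asymptotic cost).

-- ===== PORT A =====
-- the while loop: idx < len(bits); bits[idx] is always in range there
def solution_425_4_loop (bits : List Int) (idx : Nat) (flag : Bool) : Bool :=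
  if h : idx < bits.length then
    if bits[idx] = 0 then solution_425_4_loop bits (idx + 1) true
    else solution_425_4_loop bits (idx + 2) false
  else flag
termination_by bits.length - idx

def solution_425_4 (bits : List Int) : Bool :=
  solution_425_4_loop bits 0 true

-- ===== PORT B =====
-- the for-loop over rev[1:] with break, counting the run of nonzero values
def countRun : List Int → Nat
  | [] => 0
  | x :: t => if x = 0 then 0 else countRun t + 1

def solution_425_4_alt (bits : List Int) : Bool :=
  match bits.reverse with
  | [] => true                    -- if not bits: return True
  | b :: rest =>
    if b ≠ 0 then false           -- rev[0] != 0
    else decide (countRun rest % 2 = 0)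

-- ===== PRECONDITION & SPEC =====
def Spec_solution_425_4 (bits : List Int) (out : Bool) : Prop := out = solution_425_4_alt bits
instance (bits : List Int) (out : Bool) : Decidable (Spec_solution_425_4 bits out) := by unfold Spec_solution_425_4; infer_instance

-- ===== CLAIM (what is proved, stated in full; the proofs are below) =====
def Claim_equal_solution_425_4 : Prop := ∀ (bits : List Int), Dom_solution_425_4 bits → Spec_solution_425_4 bits (solution_425_4 bits)

-- ===== LEMMAS AND PROOFS =====

-- pure recursive model of A's loop on the unprocessed suffix
def gm : List Int → Bool
  | [] => true
  | b :: t =>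
    if b = 0 then gm t
    else
      match t with
      | [] => false
      | [_] => false
      | _ :: r => gm r

lemma gm_cons_zero (t : List Int) : gm (0 :: t) = gm t := by
  rw [gm.eq_def]; simp

lemma gm_cons_ne (b : Int) (t : List Int) (hb : b ≠ 0) :
    gm (b :: t) = match t with | [] => false | [_] => false | _ :: r => gm r := by
  rw [gm.eq_def]; simp [hb]

lemma aLoop_eq (bits : List Int) :
    ∀ k idx flag, bits.length - idx ≤ k →
      solution_425_4_loop bits idx flag =
        if bits.length ≤ idx then flag else gm (bits.drop idx) := by
  intro k
  induction k with
  | zero =>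
      intro idx flag h
      rw [solution_425_4_loop]
      have : ¬ idx < bits.length := by omega
      simp [this, Nat.le_of_not_lt this]
  | succ k ih =>
      intro idx flag h
      rw [solution_425_4_loop]
      by_cases hlt : idx < bits.length
      · have hdrop : bits.drop idx = bits[idx] :: bits.drop (idx + 1) :=
          List.drop_eq_getElem_cons hlt
        simp only [hlt, dif_pos, if_neg (by omega : ¬ bits.length ≤ idx)]
        by_cases hz : bits[idx] = 0
        · rw [if_pos hz, ih (idx + 1) true (by omega), hdrop, hz]
          rw [gm_cons_zero]
          by_cases h1 : bits.length ≤ idx + 1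
          · have : bits.drop (idx + 1) = [] := List.drop_eq_nil_of_le h1
            simp [h1, this, gm]
          · simp [h1]
        · rw [if_neg hz, ih (idx + 2) false (by omega), hdrop, gm_cons_ne _ _ hz]
          by_cases h1 : idx + 1 < bits.length
          · have hdrop1 : bits.drop (idx + 1) = bits[idx + 1] :: bits.drop (idx + 2) :=
              List.drop_eq_getElem_cons h1
            rw [hdrop1]
            by_cases h2 : bits.length ≤ idx + 2
            · have : bits.drop (idx + 2) = [] := List.drop_eq_nil_of_le h2
              simp [h2, this]
            · have hne : bits.drop (idx + 2) ≠ [] := by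
                intro hnil
                have := List.drop_eq_nil_iff.mp hnil
                omega
              rw [if_neg h2]
              cases hd2 : bits.drop (idx + 2) with
              | nil => exact absurd hd2 hne
              | cons a l => rfl
          · have : bits.drop (idx + 1) = [] := List.drop_eq_nil_of_le (by omega)
            simp [this, (by omega : bits.length ≤ idx + 2)]
      · have hle : bits.length ≤ idx := by omega
        simp [hlt, hle]

lemma countRun_append_zero (s l : List Int) : countRun (s ++ 0 :: l) = countRun s := by
  induction s with
  | nil => simp [countRun]
  | cons x s ih => by_cases hx : x = 0 <;> simp [countRun, hx, ih]

lemma countRun_append2 (s : List Int) (c b : Int) (hb : b ≠ 0) :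
    countRun (s ++ [c, b]) % 2 = countRun s % 2 := by
  induction s with
  | nil =>
      by_cases hc : c = 0 <;> simp [countRun, hc, hb]
  | cons x s ih =>
      by_cases hx : x = 0
      · simp [countRun, hx]
      · simp only [List.cons_append, countRun, if_neg hx]
        omega

lemma alt_cons_zero (t : List Int) (ht : t ≠ []) :
    solution_425_4_alt (0 :: t) = solution_425_4_alt t := by
  obtain ⟨c, s, hcs⟩ : ∃ c s, t.reverse = c :: s := by
    cases hr : t.reverse with
    | nil => exact absurd (by simpa using congrArg List.reverse hr) ht
    | cons c s => exact ⟨c, s, rfl⟩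
  have hrev : (0 :: t).reverse = c :: (s ++ [0]) := by
    rw [List.reverse_cons, hcs]; rfl
  by_cases hc : c = 0
  · simp [solution_425_4_alt, hrev, hcs, hc, countRun_append_zero s ([] : List Int)]
  · simp [solution_425_4_alt, hrev, hcs, hc]

lemma alt_skip (b c : Int) (r : List Int) (hb : b ≠ 0) (hr : r ≠ []) :
    solution_425_4_alt (b :: c :: r) = solution_425_4_alt r := by
  obtain ⟨d, s, hds⟩ : ∃ d s, r.reverse = d :: s := by
    cases hrr : r.reverse with
    | nil => exact absurd (by simpa using congrArg List.reverse hrr) hr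
    | cons d s => exact ⟨d, s, rfl⟩
  have hrev : (b :: c :: r).reverse = d :: (s ++ [c, b]) := by
    rw [List.reverse_cons, List.reverse_cons, hds]; simp
  by_cases hd : d = 0
  · simp [solution_425_4_alt, hrev, hds, hd, countRun_append2 s c b hb]
  · simp [solution_425_4_alt, hrev, hds, hd]

lemma gm_eq_alt_aux : ∀ (n : Nat) (bits : List Int), bits.length ≤ n → gm bits = solution_425_4_alt bits := by
  intro n
  induction n with
  | zero =>
      intro bits h
      have : bits = [] := List.eq_nil_of_length_eq_zero (by omega)
      subst this; rfl
  | succ n ih =>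
      intro bits h
      cases bits with
      | nil => rfl
      | cons b t =>
          by_cases hb : b = 0
          · subst hb
            cases t with
            | nil => simp [gm, solution_425_4_alt, countRun]
            | cons c r =>
                rw [gm_cons_zero, alt_cons_zero (c :: r) (List.cons_ne_nil _ _)]
                exact ih (c :: r) (by simp at h ⊢; omega)
          · cases t with
            | nil => simp [gm_cons_ne b [] hb, hb, solution_425_4_alt]
            | cons c r =>
                cases r with
                | nil =>
                    rw [gm_cons_ne b [c] hb]
                    by_cases hc : c = 0 <;>
                      simp [hb, hc, solution_425_4_alt, List.reverse_cons, countRun]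
                | cons x r' =>
                    have hgm : gm (b :: c :: x :: r') = gm (x :: r') := by
                      rw [gm_cons_ne _ _ hb]
                    rw [hgm, alt_skip b c (x :: r') hb (List.cons_ne_nil _ _)]
                    exact ih (x :: r') (by simp at h ⊢; omega)

lemma gm_eq_alt (bits : List Int) : gm bits = solution_425_4_alt bits :=
  gm_eq_alt_aux bits.length bits (le_refl _)

-- ===== VERDICT (by name: the statement is the Claim_ definition above) =====
theorem solution_425_4_spec : Claim_equal_solution_425_4 := by
  intro bits _
  unfold Spec_solution_425_4 solution_425_4
  rw [aLoop_eq bits bits.length 0 true (by omega)]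
  cases bits with
  | nil => rfl
  | cons b t =>
      simp only [List.length_cons, List.drop_zero]
      rw [if_neg (by omega)]
      exact gm_eq_alt (b :: t)
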